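-- pv_equiv track=rewrite | github.com/artigianitecnologici/server-ai | benchmark2.py | extract_cpu_type
-- ===== SOURCE A (Python) =====
-- def extract_cpu_type(cpu_brand):
--     if "Intel" in cpu_brand:
--         for part in cpu_brand.split():
--             if part.startswith(("i3", "i5", "i7", "i9")):
--                 return part
--     elif "Ryzen" in cpu_brand:
--         parts = cpu_brand.split()
--         for i, part in enumerate(parts):
--             if "Ryzen" in part and i + 1 < len(parts):
--                 return part + " " + parts[i + 1]
--     return "N/D"
-- ===== SOURCE B (Python) =====
-- def _tok_end(s):
--     i = 0
--     while i < len(s) and not s[i].isspace():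
--         i += 1
--     return i
--
--
-- def extract_cpu_type(cpu_brand):
--     if "Intel" in cpu_brand:
--         rest = cpu_brand.lstrip()
--         while rest:
--             cut = _tok_end(rest)
--             tok, rest = rest[:cut], rest[cut:].lstrip()
--             if tok[0] == "i" and len(tok) > 1 and tok[1] in "3579":
--                 return tok
--         return "N/D"
--     if "Ryzen" in cpu_brand:
--         rest = cpu_brand.lstrip()
--         while rest:
--             cut = _tok_end(rest)
--             tok, rest = rest[:cut], rest[cut:].lstrip()
--             if "Ryzen" in tok and rest:
--                 return tok + " " + rest[:_tok_end(rest)]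
--         return "N/D"
--     return "N/D"
-- ===== Notes on version B (the rewrite author's own statement) =====
-- stated objective: alternative
-- what changed: Replaces split()+token-list iteration (and A's enumerate/index arithmetic for the Ryzen successor word) with a single character-cursor scanner: tokens are cut off the front of the string one at a time with lstrip and a first-whitespace index, the Intel i[3579] test is done by direct character comparison on the token, and the Ryzen successor token is read straight off the remaining cursor, so no token list is ever materialized.
import Mathlib
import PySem

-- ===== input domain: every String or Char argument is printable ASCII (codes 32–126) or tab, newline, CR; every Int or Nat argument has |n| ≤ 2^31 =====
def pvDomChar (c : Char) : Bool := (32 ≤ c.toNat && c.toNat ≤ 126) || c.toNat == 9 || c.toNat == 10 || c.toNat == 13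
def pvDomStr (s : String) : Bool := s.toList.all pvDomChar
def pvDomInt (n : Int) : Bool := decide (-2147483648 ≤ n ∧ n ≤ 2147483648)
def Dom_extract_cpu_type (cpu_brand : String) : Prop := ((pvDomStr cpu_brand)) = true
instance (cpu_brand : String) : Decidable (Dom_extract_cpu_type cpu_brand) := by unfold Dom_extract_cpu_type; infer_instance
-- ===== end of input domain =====

-- B replaces A's split()+token-list loops by a character-cursor scanner that cuts tokens
-- off the front of the string one at a time; same cost, no token list is materialized.

-- ===== PORT A =====
-- 'for part in cpu_brand.split(): if part.startswith(("i3","i5","i7","i9")): return part'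
def pvIntelLoopA : List String → String
  | [] => "N/D"
  | p :: rest =>
    if PySem.Str.startswith p "i3" || PySem.Str.startswith p "i5"
        || PySem.Str.startswith p "i7" || PySem.Str.startswith p "i9" then p
    else pvIntelLoopA rest

-- 'for i, part in enumerate(parts): if "Ryzen" in part and i + 1 < len(parts): return part + " " + parts[i+1]'
def pvRyzenLoopA (parts : List String) : Nat → List String → String
  | _, [] => "N/D"
  | i, p :: rest =>
    if PySem.Str.isIn "Ryzen" p && decide (i + 1 < parts.length) then
      p ++ " " ++ ((PySem.List.pyGet? parts ((i : Int) + 1)).getD "")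
    else pvRyzenLoopA parts (i + 1) rest

def extract_cpu_type (cpu_brand : String) : String :=
  if PySem.Str.isIn "Intel" cpu_brand then
    pvIntelLoopA (PySem.Str.split₀ cpu_brand)
  else if PySem.Str.isIn "Ryzen" cpu_brand then
    let parts := PySem.Str.split₀ cpu_brand
    pvRyzenLoopA parts 0 parts
  else "N/D"

-- ===== PORT B =====
-- Source B cuts each token off the front of the cursor: tok = rest[:_tok_end(rest)],
-- rest = rest[_tok_end(rest):].lstrip() — ported as takeWhile / dropWhile at the
-- first whitespace position, then lstrip.
def pvNonWs (c : Char) : Bool := !(PySem.Chars.isspace c)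

-- 'tok[0] == "i" and len(tok) > 1 and tok[1] in "3579"'
def pvIntelOkB (tok : List Char) : Bool :=
  (tok[0]? == some 'i') &&
    (tok[1]? == some '3' || tok[1]? == some '5' || tok[1]? == some '7' || tok[1]? == some '9')

-- termination of the cursor loops: the remaining cursor strictly shrinks
theorem pvRestLt (c : Char) (t : List Char) :
    (PySem.Chars.lstrip (List.dropWhile pvNonWs (c :: t))).length < (c :: t).length := by
  by_cases h : PySem.Chars.isspace c
  · have h1 : List.dropWhile pvNonWs (c :: t) = c :: t := by
      simp [List.dropWhile_cons, pvNonWs, h]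
    have h2 : PySem.Chars.lstrip (c :: t) = List.dropWhile PySem.Chars.isspace t := by
      simp [PySem.Chars.lstrip, List.dropWhile_cons, h]
    rw [h1, h2]
    have := List.length_dropWhile_le PySem.Chars.isspace t
    simp only [List.length_cons]; omega
  · have h1 : List.dropWhile pvNonWs (c :: t) = List.dropWhile pvNonWs t := by
      simp [List.dropWhile_cons, pvNonWs, h]
    rw [h1]
    have ha := List.length_dropWhile_le PySem.Chars.isspace (List.dropWhile pvNonWs t)
    have hb := List.length_dropWhile_le pvNonWs t
    simp only [PySem.Chars.lstrip, List.length_cons]; omega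

-- Intel branch: 'while rest: tok, rest = …; if tok looks like i[3579]: return tok'
def pvIntelScanB : List Char → String
  | [] => "N/D"
  | c :: t =>
    let tok := List.takeWhile pvNonWs (c :: t)
    let rest := PySem.Chars.lstrip (List.dropWhile pvNonWs (c :: t))
    if pvIntelOkB tok then String.ofList tok
    else pvIntelScanB rest
  termination_by s => s.length
  decreasing_by exact pvRestLt c t

-- Ryzen branch: 'while rest: tok, rest = …; if "Ryzen" in tok and rest: return tok + " " + next token'
def pvRyzenScanB : List Char → String
  | [] => "N/D"
  | c :: t =>
    let tok := List.takeWhile pvNonWs (c :: t)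
    let rest := PySem.Chars.lstrip (List.dropWhile pvNonWs (c :: t))
    if PySem.Chars.isIn ['R', 'y', 'z', 'e', 'n'] tok && !rest.isEmpty then
      String.ofList tok ++ " " ++ String.ofList (List.takeWhile pvNonWs rest)
    else pvRyzenScanB rest
  termination_by s => s.length
  decreasing_by exact pvRestLt c t

def extract_cpu_type_alt (cpu_brand : String) : String :=
  if PySem.Str.isIn "Intel" cpu_brand then
    pvIntelScanB (PySem.Chars.lstrip cpu_brand.toList)
  else if PySem.Str.isIn "Ryzen" cpu_brand then
    pvRyzenScanB (PySem.Chars.lstrip cpu_brand.toList)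
  else "N/D"

-- ===== PRECONDITION & SPEC =====
def Spec_extract_cpu_type (cpu_brand : String) (out : String) : Prop := out = extract_cpu_type_alt cpu_brand
instance (cpu_brand : String) (out : String) : Decidable (Spec_extract_cpu_type cpu_brand out) := by unfold Spec_extract_cpu_type; infer_instance

-- ===== CLAIM (what is proved, stated in full; the proofs are below) =====
def Claim_equal_extract_cpu_type : Prop := ∀ (cpu_brand : String), Dom_extract_cpu_type cpu_brand → Spec_extract_cpu_type cpu_brand (extract_cpu_type cpu_brand)

-- ===== LEMMAS AND PROOFS =====

-- the head of an lstripped list is not whitespace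
theorem pvLstripHead (s : List Char) (c : Char) (t : List Char)
    (h : PySem.Chars.lstrip s = c :: t) : PySem.Chars.isspace c = false := by
  induction s with
  | nil => simp [PySem.Chars.lstrip] at h
  | cons a s ih =>
    by_cases ha : PySem.Chars.isspace a
    · exact ih (by simpa [PySem.Chars.lstrip, List.dropWhile_cons, ha] using h)
    · simp only [PySem.Chars.lstrip, List.dropWhile_cons, ha] at h
      simp only [Bool.false_eq_true, if_false] at h
      cases h; simpa using ha

-- split₀.go consumes a maximal run of non-space characters into cur
theorem pvGoToken (s : List Char) : ∀ (cur : List Char) (acc : List (List Char)),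
    PySem.Chars.split₀.go s cur acc =
      PySem.Chars.split₀.go (List.dropWhile pvNonWs s)
        ((List.takeWhile pvNonWs s).reverse ++ cur) acc := by
  induction s with
  | nil => intro cur acc; simp
  | cons c t ih =>
    intro cur acc
    by_cases h : PySem.Chars.isspace c
    · simp [List.takeWhile_cons, List.dropWhile_cons, pvNonWs, h]
    · have h1 : PySem.Chars.split₀.go (c :: t) cur acc = PySem.Chars.split₀.go t (c :: cur) acc := by
        simp [PySem.Chars.split₀.go, h]
      rw [h1, ih (c :: cur) acc]
      simp [List.takeWhile_cons, List.dropWhile_cons, pvNonWs, h]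

-- split₀.go skips leading whitespace when cur is empty
theorem pvGoLstrip (s : List Char) : ∀ (acc : List (List Char)),
    PySem.Chars.split₀.go s [] acc = PySem.Chars.split₀.go (PySem.Chars.lstrip s) [] acc := by
  induction s with
  | nil => intro acc; simp [PySem.Chars.lstrip]
  | cons c t ih =>
    intro acc
    by_cases h : PySem.Chars.isspace c
    · have h1 : PySem.Chars.split₀.go (c :: t) [] acc = PySem.Chars.split₀.go t [] acc := by
        simp [PySem.Chars.split₀.go, h]
      rw [h1, ih acc]
      simp [PySem.Chars.lstrip, List.dropWhile_cons, h]
    · simp [PySem.Chars.lstrip, List.dropWhile_cons, h]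

-- the accumulator of split₀.go is a prefix of the result
theorem pvGoAcc (n : Nat) : ∀ (s : List Char), s.length ≤ n → ∀ (acc : List (List Char)),
    PySem.Chars.split₀.go s [] acc = acc.reverse ++ PySem.Chars.split₀.go s [] [] := by
  induction n with
  | zero =>
    intro s hs acc
    have : s = [] := List.length_eq_zero_iff.mp (Nat.le_zero.mp hs)
    subst this; simp [PySem.Chars.split₀.go]
  | succ n ih =>
    intro s hs acc
    cases s with
    | nil => simp [PySem.Chars.split₀.go]
    | cons c t =>
      by_cases h : PySem.Chars.isspace c
      · have h1 : ∀ a, PySem.Chars.split₀.go (c :: t) [] a = PySem.Chars.split₀.go t [] a := by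
          intro a; simp [PySem.Chars.split₀.go, h]
        rw [h1, h1, ih t (by simpa using Nat.lt_succ_iff.mp (by simpa using hs)) acc]
      · rw [pvGoToken (c :: t) [] acc, pvGoToken (c :: t) [] []]
        have htok : List.takeWhile pvNonWs (c :: t) = c :: List.takeWhile pvNonWs t := by
          simp [List.takeWhile_cons, pvNonWs, h]
        have hdrop : List.dropWhile pvNonWs (c :: t) = List.dropWhile pvNonWs t := by
          simp [List.dropWhile_cons, pvNonWs, h]
        rw [htok, hdrop]
        set tok := c :: List.takeWhile pvNonWs t with htokdef
        have htokne : tok.reverse ++ ([] : List Char) ≠ [] := by simp [htokdef]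
        cases hr : List.dropWhile pvNonWs t with
        | nil =>
          simp [PySem.Chars.split₀.go, htokdef]
        | cons d r =>
          have hd : PySem.Chars.isspace d = true := by
            have hne : List.dropWhile pvNonWs t ≠ [] := by simp [hr]
            have := List.head_dropWhile_not pvNonWs hne
            simp only [hr, List.head_cons] at this
            simpa [pvNonWs] using this
          have hstep : ∀ a, PySem.Chars.split₀.go (d :: r) (tok.reverse ++ []) a =
              PySem.Chars.split₀.go r [] (tok :: a) := by
            intro a
            simp [PySem.Chars.split₀.go, hd, htokdef]
          rw [hstep acc, hstep []]
          have hrlen : r.length ≤ n := by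
            have h1 : (List.dropWhile pvNonWs t).length ≤ t.length :=
              List.length_dropWhile_le pvNonWs t
            rw [hr] at h1
            simp only [List.length_cons] at h1 hs
            omega
          conv_lhs => rw [ih r hrlen (tok :: acc)]
          conv_rhs => rw [ih r hrlen [tok]]
          simp

-- split₀ of an all-whitespace string is empty
theorem pvSplitNil (s : List Char) (h : PySem.Chars.lstrip s = []) :
    PySem.Chars.split₀ s = [] := by
  unfold PySem.Chars.split₀
  rw [pvGoLstrip s [], h]
  simp [PySem.Chars.split₀.go]

-- split₀ peels off the first token
theorem pvSplitCons (s : List Char) (c : Char) (t : List Char)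
    (h : PySem.Chars.lstrip s = c :: t) :
    PySem.Chars.split₀ s =
      List.takeWhile pvNonWs (c :: t) :: PySem.Chars.split₀ (List.dropWhile pvNonWs (c :: t)) := by
  have hc : PySem.Chars.isspace c = false := pvLstripHead s c t h
  unfold PySem.Chars.split₀
  rw [pvGoLstrip s [], h, pvGoToken (c :: t) [] []]
  have htok : List.takeWhile pvNonWs (c :: t) = c :: List.takeWhile pvNonWs t := by
    simp [pvNonWs, hc]
  have hdrop : List.dropWhile pvNonWs (c :: t) = List.dropWhile pvNonWs t := by
    simp [pvNonWs, hc]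
  rw [htok, hdrop]
  set tok := c :: List.takeWhile pvNonWs t with htokdef
  cases hr : List.dropWhile pvNonWs t with
  | nil => simp [PySem.Chars.split₀.go, htokdef, pvSplitNil, PySem.Chars.lstrip]
  | cons d r =>
    have hd : PySem.Chars.isspace d = true := by
      have hne : List.dropWhile pvNonWs t ≠ [] := by simp [hr]
      have := List.head_dropWhile_not pvNonWs hne
      simp only [hr, List.head_cons] at this
      simpa [pvNonWs] using this
    have h1 : PySem.Chars.split₀.go (d :: r) (tok.reverse ++ []) [] =
        PySem.Chars.split₀.go r [] [tok] := by
      simp [PySem.Chars.split₀.go, hd, htokdef]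
    have h2 : PySem.Chars.split₀.go (d :: r) [] [] = PySem.Chars.split₀.go r [] [] := by
      simp [PySem.Chars.split₀.go, hd]
    rw [h1, h2, pvGoAcc r.length r le_rfl [tok]]
    simp

-- split₀ is empty iff the string is all whitespace
theorem pvSplitEmptyIff (s : List Char) :
    PySem.Chars.split₀ s = [] ↔ PySem.Chars.lstrip s = [] := by
  constructor
  · intro h
    cases hl : PySem.Chars.lstrip s with
    | nil => rfl
    | cons c t => rw [pvSplitCons s c t hl] at h; cases h
  · exact pvSplitNil s

-- common shape of A's Intel loop: first token passing the i[3579] test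
def pvMidIntel : List String → String
  | [] => "N/D"
  | t :: rest => if pvIntelOkB t.toList then t else pvMidIntel rest

-- common shape of A's Ryzen loop: first Ryzen token that has a successor
def pvMidRyzen : List String → String
  | [] => "N/D"
  | [_] => "N/D"
  | t :: u :: rest => if PySem.Str.isIn "Ryzen" t then t ++ " " ++ u else pvMidRyzen (u :: rest)

-- A's four-way startswith test equals B's character test
theorem pvCondIntel (p : String) :
    (PySem.Str.startswith p "i3" || PySem.Str.startswith p "i5"
      || PySem.Str.startswith p "i7" || PySem.Str.startswith p "i9") = pvIntelOkB p.toList := by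
  rw [Bool.eq_iff_iff]
  simp only [PySem.Str.startswith_eq, Bool.or_eq_true, PySem.Chars.startswith_iff]
  rcases hp : p.toList with _ | ⟨c, _ | ⟨c2, r⟩⟩ <;>
    simp [pvIntelOkB, List.cons_prefix_cons, List.prefix_iff_eq_take] <;> tauto

theorem pvIntelAEq (l : List String) : pvIntelLoopA l = pvMidIntel l := by
  induction l with
  | nil => rfl
  | cons p rest ih =>
    rw [pvIntelLoopA, pvMidIntel, pvCondIntel p]
    by_cases h : pvIntelOkB p.toList <;> simp [h, ih]

theorem pvRyzenAEq (parts : List String) (i : Nat) (s : List String) (h : parts.drop i = s) :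
    pvRyzenLoopA parts i s = pvMidRyzen s := by
  induction s generalizing i with
  | nil => rfl
  | cons p rest ih =>
    have hlen : parts.length - i = rest.length + 1 := by
      have := congrArg List.length h
      simpa using this
    have hdrop : parts.drop (i + 1) = rest := by
      rw [← List.tail_drop, h]
      rfl
    rw [pvRyzenLoopA]
    cases rest with
    | nil =>
      have hguard : ¬ (i + 1 < parts.length) := by
        simp only [List.length_nil] at hlen; omega
      simp [hguard, pvRyzenLoopA, pvMidRyzen]
    | cons b rest' =>
      have hguard : i + 1 < parts.length := by
        simp only [List.length_cons] at hlen; omega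
      have hget : PySem.List.pyGet? parts ((i : Int) + 1) = some b := by
        have h1 : ((i : Int) + 1) = ((i + 1 : Nat) : Int) := by push_cast; ring
        rw [h1, PySem.List.pyGet?_natCast]
        have h2 : parts[i+1]? = (parts.drop (i+1))[0]? := by
          rw [List.getElem?_drop]
        rw [h2, hdrop]
        rfl
      have h0 : "Ryzen".toList = ['R', 'y', 'z', 'e', 'n'] := by decide
      by_cases hr : PySem.Str.isIn "Ryzen" p
      · have hr' : PySem.Chars.isIn ['R', 'y', 'z', 'e', 'n'] p.toList = true := by
          simpa [PySem.Str.isIn, h0] using hr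
        simp [pvMidRyzen, hr', hguard, hget]
      · simp only [Bool.not_eq_true] at hr
        have hr' : PySem.Chars.isIn ['R', 'y', 'z', 'e', 'n'] p.toList = false := by
          simpa [PySem.Str.isIn, h0] using hr
        rw [ih (i + 1) hdrop]
        simp [pvMidRyzen, hr']

-- B's Intel cursor scan computes the Intel loop over split₀'s tokens
theorem pvIntelBEq (n : Nat) : ∀ (cs : List Char), cs.length ≤ n →
    pvIntelScanB (PySem.Chars.lstrip cs) =
      pvMidIntel ((PySem.Chars.split₀ cs).map String.ofList) := by
  induction n with
  | zero =>
    intro cs hcs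
    have : cs = [] := List.length_eq_zero_iff.mp (Nat.le_zero.mp hcs)
    subst this
    rw [show PySem.Chars.lstrip [] = [] from rfl, pvSplitNil [] rfl, pvIntelScanB.eq_def]
    rfl
  | succ n ih =>
    intro cs hcs
    cases hl : PySem.Chars.lstrip cs with
    | nil =>
      rw [pvSplitNil cs hl, pvIntelScanB.eq_def]
      rfl
    | cons c t =>
      rw [pvSplitCons cs c t hl, pvIntelScanB.eq_def]
      dsimp only
      have hc : PySem.Chars.isspace c = false := pvLstripHead cs c t hl
      set tok := List.takeWhile pvNonWs (c :: t) with htok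
      set r := List.dropWhile pvNonWs (c :: t) with hr
      have htl : (String.ofList tok).toList = tok := by simp
      rw [List.map_cons, pvMidIntel, htl]
      by_cases hok : pvIntelOkB tok
      · simp [hok]
      · simp only [Bool.not_eq_true] at hok
        simp only [hok, Bool.false_eq_true, if_false]
        have hrlen : r.length ≤ n := by
          have h1 : (c :: t).length ≤ cs.length := by
            have := List.length_dropWhile_le PySem.Chars.isspace cs
            rw [← PySem.Chars.lstrip, hl] at this; exact this
          have h2 : r.length ≤ t.length := by
            rw [hr]
            simp only [List.dropWhile_cons, pvNonWs, hc]
            simpa using List.length_dropWhile_le pvNonWs t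
          simp only [List.length_cons] at h1
          omega
        exact ih r hrlen
-- B's Ryzen cursor scan computes the Ryzen loop over split₀'s tokens
theorem pvRyzenBEq (n : Nat) : ∀ (cs : List Char), cs.length ≤ n →
    pvRyzenScanB (PySem.Chars.lstrip cs) =
      pvMidRyzen ((PySem.Chars.split₀ cs).map String.ofList) := by
  induction n with
  | zero =>
    intro cs hcs
    have : cs = [] := List.length_eq_zero_iff.mp (Nat.le_zero.mp hcs)
    subst this
    rw [show PySem.Chars.lstrip [] = [] from rfl, pvSplitNil [] rfl, pvRyzenScanB.eq_def]
    rfl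
  | succ n ih =>
    intro cs hcs
    cases hl : PySem.Chars.lstrip cs with
    | nil =>
      rw [pvSplitNil cs hl, pvRyzenScanB.eq_def]
      rfl
    | cons c t =>
      rw [pvSplitCons cs c t hl, pvRyzenScanB.eq_def]
      dsimp only
      have hc : PySem.Chars.isspace c = false := pvLstripHead cs c t hl
      set tok := List.takeWhile pvNonWs (c :: t) with htok
      set r := List.dropWhile pvNonWs (c :: t) with hr
      have hrlen : r.length ≤ n := by
        have h1 : (c :: t).length ≤ cs.length := by
          have := List.length_dropWhile_le PySem.Chars.isspace cs
          rw [← PySem.Chars.lstrip, hl] at this; exact this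
        have h2 : r.length ≤ t.length := by
          rw [hr]
          simp only [List.dropWhile_cons, pvNonWs, hc]
          simpa using List.length_dropWhile_le pvNonWs t
        simp only [List.length_cons] at h1
        omega
      have hcond : PySem.Str.isIn "Ryzen" (String.ofList tok) =
          PySem.Chars.isIn ['R', 'y', 'z', 'e', 'n'] tok := by
        rw [PySem.Str.isIn]
        simp
      cases hsr : PySem.Chars.split₀ r with
      | nil =>
        have hlr : PySem.Chars.lstrip r = [] := (pvSplitEmptyIff r).mp hsr
        rw [List.map_cons, List.map_nil, pvMidRyzen.eq_def]
        simp only [hlr, List.isEmpty_nil, Bool.not_true, Bool.and_false, Bool.false_eq_true,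
          if_false]
        rw [pvRyzenScanB.eq_def]
      | cons tk2 rest2 =>
        have hlr : PySem.Chars.lstrip r ≠ [] := by
          intro hh
          rw [pvSplitNil r hh] at hsr
          cases hsr
        obtain ⟨d, u, hdu⟩ : ∃ d u, PySem.Chars.lstrip r = d :: u := by
          cases hx : PySem.Chars.lstrip r with
          | nil => exact absurd hx hlr
          | cons d u => exact ⟨d, u, rfl⟩
        have htk2 : tk2 = List.takeWhile pvNonWs (d :: u) ∧
            rest2 = PySem.Chars.split₀ (List.dropWhile pvNonWs (d :: u)) := by
          rw [pvSplitCons r d u hdu] at hsr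
          exact ⟨(List.cons.injEq _ _ _ _ ▸ hsr).1.symm, (List.cons.injEq _ _ _ _ ▸ hsr).2.symm⟩
        rw [List.map_cons, List.map_cons, pvMidRyzen, hcond]
        simp only [hdu, List.isEmpty_cons, Bool.not_false, Bool.and_true]
        have htl : (String.ofList tok).toList = tok := by simp
        by_cases hin : PySem.Chars.isIn ['R', 'y', 'z', 'e', 'n'] tok
        · simp only [hin, if_true]
          rw [htk2.1, ← hdu]
        · simp only [Bool.not_eq_true] at hin
          simp only [hin, Bool.false_eq_true, if_false]
          have := ih r hrlen
          rw [hsr, List.map_cons, hdu] at this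
          exact this

-- ===== VERDICT (by name: the statement is the Claim_ definition above) =====
theorem extract_cpu_type_spec : Claim_equal_extract_cpu_type := by
  intro s _
  unfold Spec_extract_cpu_type extract_cpu_type extract_cpu_type_alt
  split_ifs with h1 h2
  · rw [pvIntelAEq, PySem.Str.split₀,
      pvIntelBEq s.toList.length s.toList le_rfl]
  · rw [pvRyzenAEq (PySem.Str.split₀ s) 0 (PySem.Str.split₀ s) rfl, PySem.Str.split₀,
      pvRyzenBEq s.toList.length s.toList le_rfl]
  · rfl
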